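-- pv_equiv track=rewrite | github.com/zhuny/Codejam | Candies/__main__.py | alter_sum
-- ===== SOURCE A (Python) =====
-- def alter_sum(A):
--     new_list = []
--     alter = 0
--     for i in reversed(A):
--         alter = i-alter
--         new_list.append(alter)
--     new_list.reverse()
--     return new_list
-- ===== SOURCE B (Python) =====
-- def alter_sum(A):
--     n = len(A)
--     return [sum((-1) ** (k - i) * A[k] for k in range(i, n)) for i in range(n)]
-- ===== Notes on version B (the rewrite author's own statement) =====
-- stated objective: alternative
-- what changed: Replaces A's single right-to-left recurrence with accumulator and final reverse by a direct per-element definition: element i is the alternating-sign sum of the suffix A[i:], computed by an independent inner scan.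
import Mathlib
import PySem

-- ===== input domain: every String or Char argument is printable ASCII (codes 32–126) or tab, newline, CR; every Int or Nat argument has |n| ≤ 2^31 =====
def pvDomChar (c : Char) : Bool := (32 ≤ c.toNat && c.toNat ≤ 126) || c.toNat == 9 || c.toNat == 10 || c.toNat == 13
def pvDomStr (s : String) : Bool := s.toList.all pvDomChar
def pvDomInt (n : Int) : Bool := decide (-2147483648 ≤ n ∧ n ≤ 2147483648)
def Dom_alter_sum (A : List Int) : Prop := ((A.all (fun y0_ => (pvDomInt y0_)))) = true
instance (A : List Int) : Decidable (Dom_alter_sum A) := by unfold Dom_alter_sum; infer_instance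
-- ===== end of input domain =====

-- B computes each element directly as the alternating-sign sum of its suffix (a nested
-- double pass) instead of A's single right-to-left recurrence with a final reverse;
-- objective: alternative formulation, not faster.

-- ===== PORT A =====
-- literal port of A: fold over reversed(A) carrying (new_list, alter), then reverse
def alter_sum (A : List Int) : List Int :=
  let p := A.reverse.foldl
    (fun (st : List Int × Int) (i : Int) =>
      let alter := i - st.2
      (st.1 ++ [alter], alter)) ([], 0)
  p.1.reverse

-- ===== PORT B =====
-- literal port of B: for each i in range(n), sum of (-1)^(k-i) * A[k] for k in range(i, n)
def alter_sum_alt (A : List Int) : List Int :=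
  let n := A.length
  (List.range n).map (fun i =>
    (List.range' i (n - i)).foldl (fun s k => s + (-1 : Int) ^ (k - i) * A.getD k 0) 0)

-- ===== PRECONDITION & SPEC =====
def Spec_alter_sum (A : List Int) (out : List Int) : Prop := out = alter_sum_alt A
instance (A : List Int) (out : List Int) : Decidable (Spec_alter_sum A out) := by unfold Spec_alter_sum; infer_instance

-- ===== CLAIM (what is proved, stated in full; the proofs are below) =====
def Claim_equal_alter_sum : Prop := ∀ (A : List Int), Dom_alter_sum A → Spec_alter_sum A (alter_sum A)

-- ===== LEMMAS AND PROOFS =====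

-- reference: alternating sum of a list, and the list of suffix alternating sums
def pvAlt : List Int → Int
  | [] => 0
  | a :: t => a - pvAlt t

def pvRef : List Int → List Int
  | [] => []
  | a :: t => (a - pvAlt t) :: pvRef t

theorem pvA_loop (A : List Int) :
    (A.reverse.foldl
      (fun (st : List Int × Int) (i : Int) =>
        (st.1 ++ [i - st.2], i - st.2)) ([], 0)) =
    ((pvRef A).reverse, pvAlt A) := by
  induction A with
  | nil => simp [pvRef, pvAlt]
  | cons a t ih =>
    simp only [List.reverse_cons, List.foldl_append, ih, List.foldl_cons, List.foldl_nil,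
      pvRef, pvAlt, List.reverse_cons]

theorem pvA_eq (A : List Int) : alter_sum A = pvRef A := by
  unfold alter_sum
  simp only [pvA_loop]
  exact List.reverse_reverse _

theorem pv_foldl_add (f : Nat → Int) (l : List Nat) (s : Int) :
    l.foldl (fun acc k => acc + f k) s = s + (l.map f).sum := by
  induction l generalizing s with
  | nil => simp
  | cons a t ih => simp [ih, add_assoc]

theorem pv_sum_neg (f : Nat → Int) (l : List Nat) :
    (l.map (fun j => -(f j))).sum = -(l.map f).sum := by
  induction l with
  | nil => simp
  | cons a t ih => simp [ih]; ring

theorem pv_full_sum (A : List Int) :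
    ((List.range A.length).map (fun j => (-1 : Int) ^ j * A.getD j 0)).sum = pvAlt A := by
  induction A with
  | nil => simp [pvAlt]
  | cons a t ih =>
    rw [List.length_cons, List.range_succ_eq_map]
    simp only [List.map_cons, List.map_map, List.sum_cons, pow_zero, one_mul,
      List.getD_cons_zero, pvAlt]
    have hcong : (List.range t.length).map ((fun j => (-1 : Int) ^ j * (a :: t).getD j 0) ∘ Nat.succ)
        = (List.range t.length).map (fun j => -((-1 : Int) ^ j * t.getD j 0)) := by
      apply List.map_congr_left
      intro j _
      simp only [Function.comp_apply, List.getD_cons_succ, pow_succ]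
      ring
    rw [hcong, pv_sum_neg (fun j => (-1 : Int) ^ j * t.getD j 0), ih]
    ring

theorem pvB_elem (A : List Int) (i : Nat) :
    (List.range' i (A.length - i)).foldl (fun s k => s + (-1 : Int) ^ (k - i) * A.getD k 0) 0
      = pvAlt (A.drop i) := by
  rw [pv_foldl_add, zero_add, List.range'_eq_map_range]
  have h1 : ((List.range (A.length - i)).map (i + ·)).map
      (fun k => (-1 : Int) ^ (k - i) * A.getD k 0)
      = (List.range (A.drop i).length).map (fun j => (-1 : Int) ^ j * (A.drop i).getD j 0) := by
    rw [List.map_map, List.length_drop]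
    apply List.map_congr_left
    intro j hj
    simp only [Function.comp]
    congr 1
    · congr 1; omega
    · rw [List.getD_eq_getElem?_getD, List.getD_eq_getElem?_getD, List.getElem?_drop]
  rw [h1, pv_full_sum]

theorem pv_ref_suffix (A : List Int) :
    (List.range A.length).map (fun i => pvAlt (A.drop i)) = pvRef A := by
  induction A with
  | nil => simp [pvRef]
  | cons a t ih =>
    rw [List.length_cons, List.range_succ_eq_map]
    simp only [List.map_cons, List.map_map, List.drop_zero, pvRef, pvAlt]
    have h2 : (List.range t.length).map ((fun i => pvAlt ((a :: t).drop i)) ∘ Nat.succ)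
        = pvRef t := by
      rw [← ih]
      apply List.map_congr_left
      intro j _
      simp [Function.comp]
    rw [h2]

theorem pvB_eq (A : List Int) : alter_sum_alt A = pvRef A := by
  unfold alter_sum_alt
  rw [← pv_ref_suffix]
  apply List.map_congr_left
  intro i _
  exact pvB_elem A i

-- ===== VERDICT (by name: the statement is the Claim_ definition above) =====
theorem alter_sum_spec : Claim_equal_alter_sum := by
  intro A _
  unfold Spec_alter_sum
  rw [pvA_eq, pvB_eq]
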